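-- pv_equiv track=rewrite | github.com/gouki510/Topology_of_Reasoning | src/utils.py | floyd_cycle_detection
-- ===== SOURCE A (Python) =====
-- def floyd_cycle_detection(graph):
--     """
--     graph: 各インデックス i に対し、graph[i] が次に遷移するノードのインデックスを表すリスト
--     return: (entry, cycle_length)
--             entry: ループの入口ノードのインデックス（ループがなければ None）
--             cycle_length: ループ内のノード数（すなわち 1 周するのに必要なステップ数）
--     """
--     slow = 0
--     fast = 0
--
--     # ループの検出
--     while True:
--         # 次のノードがリスト外なら終端に達しているとみなす
--         if fast >= len(graph) or graph[fast] >= len(graph):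
--             return None, 0
--         slow = graph[slow]              # カメは 1 ステップ進む
--         fast = graph[graph[fast]]       # ウサギは 2 ステップ進む
--         if slow == fast:
--             # ループ発見
--             break
--
--     # ループ入口の特定
--     slow = 0  # slow をスタート（0）に戻す
--     while slow != fast:
--         slow = graph[slow]
--         fast = graph[fast]
--     entry = slow  # これがループの入口
--
--     # ループ長の計算
--     cycle_length = 1
--     fast = graph[entry]
--     while fast != entry:
--         fast = graph[fast]
--         cycle_length += 1
--
--     return entry, cycle_length
-- ===== SOURCE B (Python) =====
-- def floyd_cycle_detection(graph):
--     """Single-pass cycle detection: walk from node 0 recording the step at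
--     which each index was first visited; the first revisited index is the
--     cycle entry and the step difference is the cycle length."""
--     seen = {}
--     cur = 0
--     step = 0
--     while True:
--         if cur >= len(graph):
--             return None, 0
--         if cur in seen:
--             return cur, step - seen[cur]
--         seen[cur] = step
--         cur = graph[cur]
--         step += 1
-- ===== Notes on version B (the rewrite author's own statement) =====
-- stated objective: simpler
-- what changed: Replaced Floyd's three two-pointer passes (meet, rewind to find the entry, walk the cycle to measure it) by a single walk from node 0 that records in a dict the step at which each index was first visited: the first revisited index is the entry and the step difference is the cycle length.
import Mathlib
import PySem

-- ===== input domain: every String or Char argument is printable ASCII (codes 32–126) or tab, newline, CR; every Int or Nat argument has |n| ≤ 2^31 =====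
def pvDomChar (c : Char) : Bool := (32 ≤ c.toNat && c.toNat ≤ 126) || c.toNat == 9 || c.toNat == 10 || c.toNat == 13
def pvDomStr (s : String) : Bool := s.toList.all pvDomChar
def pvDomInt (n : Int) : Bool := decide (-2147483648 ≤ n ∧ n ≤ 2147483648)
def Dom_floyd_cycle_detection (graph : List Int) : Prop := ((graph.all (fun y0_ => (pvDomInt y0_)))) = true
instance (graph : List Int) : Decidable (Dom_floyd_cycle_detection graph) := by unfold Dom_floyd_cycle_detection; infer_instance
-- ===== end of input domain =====

-- B replaces A's three two-pointer Floyd passes by one walk with a first-visit-step dict (objective: simpler).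

-- ===== PORT A =====
-- A's three while-loops, fuel-bounded (the fuel 2*len+2 is proved sufficient on
-- Pre_; the fuel-0 value is never reached there).

-- third loop: cycle_length = 1; fast = graph[entry]; while fast != entry: ...
def floydA3 (graph : List Int) : Nat → Int → Int → Int → Option Int × Int
  | 0, _, _, _ => (none, 0)
  | fuel+1, entry, fast, cl =>
    if fast = entry then (some entry, cl)
    else match PySem.List.pyGet? graph fast with
      | none => (none, 0)   -- Python raises IndexError here; outside Pre_
      | some f' => floydA3 graph fuel entry f' (cl + 1)

-- second loop: slow = 0; while slow != fast: slow = graph[slow]; fast = graph[fast]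
def floydA2 (graph : List Int) : Nat → Int → Int → Option Int × Int
  | 0, _, _ => (none, 0)
  | fuel+1, slow, fast =>
    if slow = fast then
      match PySem.List.pyGet? graph slow with
      | none => (none, 0)   -- IndexError; outside Pre_
      | some f' => floydA3 graph (2*graph.length+2) slow f' 1
    else match PySem.List.pyGet? graph slow, PySem.List.pyGet? graph fast with
      | some s', some f' => floydA2 graph fuel s' f'
      | _, _ => (none, 0)   -- IndexError; outside Pre_

-- first loop: the detection loop with the two termination checks
def floydA1 (graph : List Int) : Nat → Int → Int → Option Int × Int
  | 0, _, _ => (none, 0)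
  | fuel+1, slow, fast =>
    if (graph.length : Int) ≤ fast then (none, 0)
    else match PySem.List.pyGet? graph fast with
      | none => (none, 0)   -- IndexError; outside Pre_
      | some nf =>
        if (graph.length : Int) ≤ nf then (none, 0)
        else match PySem.List.pyGet? graph slow, PySem.List.pyGet? graph nf with
          | some s', some f' =>
            if s' = f' then floydA2 graph (2*graph.length+2) 0 f'
            else floydA1 graph fuel s' f'
          | _, _ => (none, 0)   -- IndexError; outside Pre_

def floyd_cycle_detection (graph : List Int) : Option Int × Int :=
  floydA1 graph (2*graph.length+2) 0 0

-- ===== PORT B =====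
-- B's single loop: seen = {}; cur = 0; step = 0; while True: ...
def floydB (graph : List Int) : Nat → PySem.Dict Int Int → Int → Int → Option Int × Int
  | 0, _, _, _ => (none, 0)
  | fuel+1, seen, cur, step =>
    if (graph.length : Int) ≤ cur then (none, 0)
    else match PySem.Dict.get? seen cur with
      | some s0 => (some cur, step - s0)
      | none =>
        match PySem.List.pyGet? graph cur with
        | none => (none, 0)   -- IndexError; outside Pre_
        | some nxt => floydB graph fuel (PySem.Dict.insert seen cur step) nxt (step + 1)

def floyd_cycle_detection_alt (graph : List Int) : Option Int × Int :=
  floydB graph (2*graph.length+2) PySem.Dict.empty 0 0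

-- ===== PRECONDITION & SPEC =====
-- The successor map of the walk (graph[i], defaulting to 0 where Python would
-- raise — the default is never relied on inside Pre_) and the orbit of node 0.
def pvG (graph : List Int) (i : Int) : Int := (PySem.List.pyGet? graph i).getD 0

def pvX (graph : List Int) : Nat → Int
  | 0 => 0
  | k+1 => pvG graph (pvX graph k)

-- Pre_ excludes exactly the inputs on which A raises IndexError: those where
-- the walk from node 0 reaches an index below -len(graph) before reaching one
-- ≥ len(graph) (2*len+1 steps suffice: a longer in-range walk must repeat and
-- is then periodic forever).  B raises on exactly the same inputs.
def Pre_floyd_cycle_detection (graph : List Int) : Prop :=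
  ∀ j, j ≤ 2*graph.length + 1 →
    (∀ i, i < j → -(graph.length : Int) ≤ pvX graph i ∧ pvX graph i < graph.length) →
    -(graph.length : Int) ≤ pvX graph j

instance (graph : List Int) : Decidable (Pre_floyd_cycle_detection graph) := by
  unfold Pre_floyd_cycle_detection; infer_instance

def pvWitness_floyd_cycle_detection : List Int := [1, 0]

def Spec_floyd_cycle_detection (graph : List Int) (out : Option Int × Int) : Prop := out = floyd_cycle_detection_alt graph
instance (graph : List Int) (out : Option Int × Int) : Decidable (Spec_floyd_cycle_detection graph out) := by unfold Spec_floyd_cycle_detection; infer_instance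

-- ===== CLAIM (what is proved, stated in full; the proofs are below) =====
def Claim_equal_floyd_cycle_detection : Prop := ∀ (graph : List Int), Dom_floyd_cycle_detection graph → Pre_floyd_cycle_detection graph → Spec_floyd_cycle_detection graph (floyd_cycle_detection graph)

-- ===== LEMMAS AND PROOFS =====

theorem pvX_succ (graph : List Int) (k : Nat) :
    pvX graph (k+1) = pvG graph (pvX graph k) := rfl

-- pyGet? succeeds on in-range indices and yields pvG
theorem pvG_some (graph : List Int) (i : Int)
    (h1 : -(graph.length : Int) ≤ i) (h2 : i < (graph.length : Int)) :
    PySem.List.pyGet? graph i = some (pvG graph i) := by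
  rcases ho : PySem.List.pyGet? graph i with _ | v
  · rw [PySem.List.pyGet?_eq_none_iff] at ho
    exact absurd ⟨h1, h2⟩ ho
  · simp [pvG, ho]

-- propagation: an equality of orbit points propagates forward
theorem pvX_prop (graph : List Int) (a b : Nat)
    (h : pvX graph a = pvX graph b) :
    ∀ i, pvX graph (a+i) = pvX graph (b+i) := by
  intro i
  induction i with
  | zero => simpa using h
  | succ i ih => rw [Nat.add_succ, Nat.add_succ, pvX_succ, pvX_succ, ih]

-- after a repetition the orbit stays among the points of the bracketed segment
theorem pvX_stay (graph : List Int) (a b : Nat) (hab : a < b)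
    (he : pvX graph a = pvX graph b) :
    ∀ i, ∃ c, a ≤ c ∧ c < b ∧ pvX graph (a+i) = pvX graph c := by
  intro i
  induction i with
  | zero => exact ⟨a, le_rfl, hab, rfl⟩
  | succ i ih =>
    obtain ⟨c, hac, hcb, hc⟩ := ih
    by_cases hcb1 : c + 1 < b
    · exact ⟨c+1, by omega, hcb1, by rw [Nat.add_succ, pvX_succ, pvX_succ, hc]⟩
    · have hcb1' : c + 1 = b := by omega
      refine ⟨a, le_rfl, hab, ?_⟩
      rw [Nat.add_succ, pvX_succ, hc]
      rw [← pvX_succ, hcb1', ← he]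

-- if the orbit escapes at step j, the first j+1 points are pairwise distinct
theorem pvX_noRepEsc (graph : List Int) (j : Nat)
    (hhi : ∀ c, c < j → pvX graph c < (graph.length : Int))
    (hesc : (graph.length : Int) ≤ pvX graph j) :
    ∀ a b, a < b → b ≤ j → pvX graph a ≠ pvX graph b := by
  intro a b hab hbj he
  obtain ⟨c, hac, hcb, hc⟩ := pvX_stay graph a b hab he (j - a)
  have hj : a + (j - a) = j := by omega
  rw [hj] at hc
  have : pvX graph c < (graph.length : Int) := hhi c (by omega)
  omega

-- the dict B has built after s steps
def pvD (graph : List Int) (s : Nat) : PySem.Dict Int Int :=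
  ⟨(List.range s).map fun i => (pvX graph i, (i : Int))⟩

theorem pvD_get_none (graph : List Int) (s : Nat) (c : Int)
    (h : ∀ i, i < s → pvX graph i ≠ c) :
    PySem.Dict.get? (pvD graph s) c = none := by
  unfold PySem.Dict.get? pvD
  rw [List.find?_eq_none.mpr]
  · rfl
  · intro p hp
    simp only [List.mem_map, List.mem_range] at hp
    obtain ⟨i, hi, rfl⟩ := hp
    simpa using h i hi

theorem pvD_insert (graph : List Int) (s : Nat)
    (h : ∀ i, i < s → pvX graph i ≠ pvX graph s) :
    PySem.Dict.insert (pvD graph s) (pvX graph s) (s : Int) = pvD graph (s+1) := by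
  have hc : (pvD graph s).contains (pvX graph s) = false := by
    rw [PySem.Dict.contains_eq_isSome_get?, pvD_get_none graph s _ h]
    rfl
  unfold PySem.Dict.insert
  rw [hc]
  simp only [Bool.false_eq_true, if_false, pvD, List.range_succ, List.map_append, List.map_cons,
    List.map_nil]

-- ===== escape case: the walk reaches an index ≥ len at step j =====

theorem escB (graph : List Int) (j : Nat)
    (hlo : ∀ a, a < j → -(graph.length : Int) ≤ pvX graph a)
    (hhi : ∀ a, a < j → pvX graph a < (graph.length : Int))
    (hesc : (graph.length : Int) ≤ pvX graph j) :
    ∀ fuel s, s ≤ j → j + 1 ≤ s + fuel →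
      floydB graph fuel (pvD graph s) (pvX graph s) (s : Int) = (none, 0) := by
  intro fuel
  induction fuel with
  | zero => intro s h1 h2; omega
  | succ fuel ih =>
    intro s h1 h2
    by_cases hsj : s = j
    · subst hsj
      rw [floydB, if_pos hesc]
    · have hsj' : s < j := by omega
      rw [floydB, if_neg (by have := hhi s hsj'; omega)]
      rw [pvD_get_none graph s _ (fun i hi => pvX_noRepEsc graph j hhi hesc i s hi (by omega))]
      rw [pvG_some graph _ (hlo s hsj') (hhi s hsj')]
      rw [pvD_insert graph s (fun i hi => pvX_noRepEsc graph j hhi hesc i s hi (by omega))]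
      have : ((s : Int) + 1) = ((s+1 : Nat) : Int) := by push_cast; ring
      rw [this, ← pvX_succ]
      exact ih (s+1) (by omega) (by omega)

theorem escA (graph : List Int) (j : Nat)
    (hlo : ∀ a, a < j → -(graph.length : Int) ≤ pvX graph a)
    (hhi : ∀ a, a < j → pvX graph a < (graph.length : Int))
    (hesc : (graph.length : Int) ≤ pvX graph j) :
    ∀ fuel k, 2*k ≤ j → j + 1 ≤ 2*k + fuel →
      floydA1 graph fuel (pvX graph k) (pvX graph (2*k)) = (none, 0) := by
  intro fuel
  induction fuel with
  | zero => intro k h1 h2; omega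
  | succ fuel ih =>
    intro k h1 h2
    by_cases h2k : 2*k = j
    · rw [floydA1, if_pos (h2k ▸ hesc)]
    · have h2k' : 2*k < j := by omega
      rw [floydA1, if_neg (by have := hhi _ h2k'; omega)]
      rw [pvG_some graph _ (hlo _ h2k') (hhi _ h2k'), ← pvX_succ]
      dsimp only
      by_cases h2k1 : 2*k+1 = j
      · rw [if_pos (h2k1 ▸ hesc)]
      · have h2k1' : 2*k+1 < j := by omega
        rw [if_neg (by have := hhi _ h2k1'; omega)]
        rw [pvG_some graph _ (hlo _ (by omega)) (hhi _ (by omega)), ← pvX_succ]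
        rw [pvG_some graph _ (hlo _ h2k1') (hhi _ h2k1'), ← pvX_succ]
        dsimp only
        rw [if_neg (pvX_noRepEsc graph j hhi hesc (k+1) (2*k+1+1) (by omega) (by omega))]
        have hx : pvX graph (2*k+1+1) = pvX graph (2*(k+1)) := by congr 1
        rw [hx]
        exact ih (k+1) (by omega) (by omega)

-- ===== periodic case: the whole orbit stays in range =====

-- one-period shift
theorem per1 (graph : List Int) (t p : Nat)
    (h0 : pvX graph (t+p) = pvX graph t) :
    ∀ k, t ≤ k → pvX graph (k+p) = pvX graph k := by
  intro k hk
  induction k with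
  | zero => simpa [Nat.le_zero.mp hk] using h0
  | succ k ih =>
    by_cases hk' : t ≤ k
    · have := ih hk'
      rw [show k+1+p = (k+p)+1 by omega, pvX_succ, this, ← pvX_succ]
    · have ht : t = k + 1 := by omega
      rw [← ht]; rw [ht] at h0 ⊢; exact h0

theorem perAdd (graph : List Int) (t p : Nat)
    (h0 : pvX graph (t+p) = pvX graph t) :
    ∀ k, t ≤ k → ∀ c, pvX graph (k + c*p) = pvX graph k := by
  intro k hk c
  induction c with
  | zero => simp
  | succ c ih =>
    rw [show k + (c+1)*p = (k + c*p) + p by ring, per1 graph t p h0 _ (by omega), ih]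

-- any recurrence gap at or beyond t is a multiple of p
theorem pvX_gap (graph : List Int) (t p : Nat)
    (h0 : pvX graph (t+p) = pvX graph t) (hp : 0 < p)
    (hpmin : ∀ c, 0 < c → c < p → pvX graph (t+c) ≠ pvX graph t) :
    ∀ a d, t ≤ a → 0 < d → pvX graph (a+d) = pvX graph a → p ∣ d := by
  intro a d ha hd he
  have hap : a ≤ a * p := Nat.le_mul_of_pos_right a hp
  have h1 : pvX graph (t + a*p) = pvX graph t := perAdd graph t p h0 t le_rfl a
  have hprop := pvX_prop graph (a+d) a he
  have h2 : pvX graph (t + a*p + d) = pvX graph t := by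
    have e1 : t + a*p + d = (a + d) + (t + a*p - a) := by omega
    have e2 : a + (t + a*p - a) = t + a*p := by omega
    rw [e1, hprop, e2, h1]
  set q := d / p with hq
  set r := d % p with hr
  have hdm : p * q + r = d := Nat.div_add_mod d p
  have hrp : r < p := Nat.mod_lt d hp
  have e3 : t + a*p + d = (t + r) + (a + q)*p := by
    have : (a+q)*p = a*p + q*p := Nat.add_mul a q p
    have : q*p = p*q := Nat.mul_comm q p
    omega
  have h3 : pvX graph (t + r) = pvX graph t := by
    rw [← perAdd graph t p h0 (t+r) (by omega) (a+q), ← e3, h2]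
  rcases Nat.eq_zero_or_pos r with h | h
  · exact Nat.dvd_of_mod_eq_zero (by omega)
  · exact absurd h3 (hpmin r h hrp)

theorem pvX_tle (graph : List Int) (t : Nat)
    (htmin : ∀ a, a < t → ¬ ∃ c, 0 < c ∧ pvX graph (a+c) = pvX graph a) :
    ∀ a d, 0 < d → pvX graph (a+d) = pvX graph a → t ≤ a := by
  intro a d hd he
  by_contra h
  exact htmin a (by omega) ⟨d, hd, he⟩

-- injectivity of the first t+p orbit points
theorem pvX_inj (graph : List Int) (t p : Nat)
    (h0 : pvX graph (t+p) = pvX graph t) (hp : 0 < p)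
    (htmin : ∀ a, a < t → ¬ ∃ c, 0 < c ∧ pvX graph (a+c) = pvX graph a)
    (hpmin : ∀ c, 0 < c → c < p → pvX graph (t+c) ≠ pvX graph t) :
    ∀ a b, a < b → b < t + p → pvX graph a ≠ pvX graph b := by
  intro a b hab hb he
  have he' : pvX graph (a + (b-a)) = pvX graph a := by
    rw [show a + (b-a) = b by omega]; exact he.symm
  have hta : t ≤ a := pvX_tle graph t htmin a (b-a) (by omega) he'
  have hdvd : p ∣ (b-a) := pvX_gap graph t p h0 hp hpmin a (b-a) hta (by omega) he'
  have := Nat.le_of_dvd (by omega) hdvd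
  omega

-- phase 3 of A in the periodic case
theorem perA3 (graph : List Int) (t p : Nat)
    (hlo : ∀ a, -(graph.length : Int) ≤ pvX graph a)
    (hhi : ∀ a, pvX graph a < (graph.length : Int))
    (h0 : pvX graph (t+p) = pvX graph t)
    (hpmin : ∀ c, 0 < c → c < p → pvX graph (t+c) ≠ pvX graph t) :
    ∀ fuel c, 0 < c → c ≤ p → p + 1 ≤ c + fuel →
      floydA3 graph fuel (pvX graph t) (pvX graph (t+c)) (c : Int) =
        (some (pvX graph t), (p : Int)) := by
  intro fuel
  induction fuel with
  | zero => intro c h1 h2 h3; omega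
  | succ fuel ih =>
    intro c h1 h2 h3
    by_cases hcp : c = p
    · subst hcp
      rw [floydA3, if_pos h0]
    · rw [floydA3, if_neg (hpmin c h1 (by omega))]
      rw [pvG_some graph _ (hlo _) (hhi _), ← pvX_succ]
      dsimp only
      have : (c : Int) + 1 = ((c+1 : Nat) : Int) := by push_cast; ring
      rw [this, show t+c+1 = t+(c+1) by omega]
      exact ih (c+1) (by omega) (by omega) (by omega)

-- phase 2 of A in the periodic case (m = meeting step, a multiple of p, ≥ t)
theorem perA2 (graph : List Int) (t p m : Nat)
    (hlo : ∀ a, -(graph.length : Int) ≤ pvX graph a)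
    (hhi : ∀ a, pvX graph a < (graph.length : Int))
    (h0 : pvX graph (t+p) = pvX graph t) (hp : 0 < p) (hm : 0 < m)
    (htmin : ∀ a, a < t → ¬ ∃ c, 0 < c ∧ pvX graph (a+c) = pvX graph a)
    (hpmin : ∀ c, 0 < c → c < p → pvX graph (t+c) ≠ pvX graph t)
    (hdvd : p ∣ m) (hple : p ≤ 2*graph.length + 2) :
    ∀ fuel i, i ≤ t → t + 1 ≤ i + fuel →
      floydA2 graph fuel (pvX graph i) (pvX graph (2*m + i)) =
        (some (pvX graph t), (p : Int)) := by
  intro fuel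
  induction fuel with
  | zero => intro i h1 h2; omega
  | succ fuel ih =>
    intro i h1 h2
    by_cases hit : i = t
    · rw [hit]
      have heq : pvX graph (2*m + t) = pvX graph t := by
        obtain ⟨c, hc⟩ := hdvd
        rw [show 2*m + t = t + (2*c)*p by subst hc; ring]
        exact perAdd graph t p h0 t le_rfl (2*c)
      rw [floydA2, if_pos heq.symm]
      rw [pvG_some graph _ (hlo _) (hhi _), ← pvX_succ]
      dsimp only
      have h1' : (1 : Int) = ((1 : Nat) : Int) := by norm_num
      rw [h1']
      exact perA3 graph t p hlo hhi h0 hpmin (2*graph.length+2) 1 (by omega) (by omega) (by omega)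
    · have hit' : i < t := by omega
      have hne : pvX graph i ≠ pvX graph (2*m + i) := by
        intro he
        have he' : pvX graph (i + 2*m) = pvX graph i := by
          rw [Nat.add_comm i (2*m)]; exact he.symm
        have := pvX_tle graph t htmin i (2*m) (by omega) he'
        omega
      rw [floydA2, if_neg hne]
      rw [pvG_some graph _ (hlo _) (hhi _), ← pvX_succ]
      rw [pvG_some graph _ (hlo _) (hhi _), ← pvX_succ]
      dsimp only
      rw [show 2*m + i + 1 = 2*m + (i+1) by omega]
      exact ih (i+1) (by omega) (by omega)

-- phase 1 of A in the periodic case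
theorem perA1 (graph : List Int) (t p m : Nat)
    (hlo : ∀ a, -(graph.length : Int) ≤ pvX graph a)
    (hhi : ∀ a, pvX graph a < (graph.length : Int))
    (h0 : pvX graph (t+p) = pvX graph t) (hp : 0 < p) (hm : 0 < m)
    (htmin : ∀ a, a < t → ¬ ∃ c, 0 < c ∧ pvX graph (a+c) = pvX graph a)
    (hpmin : ∀ c, 0 < c → c < p → pvX graph (t+c) ≠ pvX graph t)
    (hmeet : pvX graph m = pvX graph (2*m))
    (hmmin : ∀ k, 0 < k → k < m → pvX graph k ≠ pvX graph (2*k))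
    (hdvd : p ∣ m) (htle : t ≤ graph.length*2) (hple : p ≤ 2*graph.length + 2) :
    ∀ fuel k, k < m → m ≤ k + fuel →
      floydA1 graph fuel (pvX graph k) (pvX graph (2*k)) =
        (some (pvX graph t), (p : Int)) := by
  intro fuel
  induction fuel with
  | zero => intro k h1 h2; omega
  | succ fuel ih =>
    intro k h1 h2
    rw [floydA1, if_neg (by have := hhi (2*k); omega)]
    rw [pvG_some graph _ (hlo _) (hhi _), ← pvX_succ]
    dsimp only
    rw [if_neg (by have := hhi (2*k+1); omega)]
    rw [pvG_some graph _ (hlo _) (hhi _), ← pvX_succ]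
    rw [pvG_some graph _ (hlo _) (hhi _), ← pvX_succ]
    dsimp only
    by_cases hk1 : k + 1 = m
    · have hmeet' : pvX graph (k+1) = pvX graph (2*k+1+1) := by
        rw [show 2*k+1+1 = 2*(k+1) by omega, hk1]; exact hk1 ▸ hmeet
      rw [if_pos hmeet']
      have e0 : (0 : Int) = pvX graph 0 := rfl
      have e1 : pvX graph (2*k+1+1) = pvX graph (2*m + 0) := by
        rw [show 2*k+1+1 = 2*(k+1) by omega, hk1, Nat.add_zero]
      rw [e0, e1]
      exact perA2 graph t p m hlo hhi h0 hp hm htmin hpmin hdvd hple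
        (2*graph.length+2) 0 (by omega) (by omega)
    · have hne : pvX graph (k+1) ≠ pvX graph (2*k+1+1) := by
        rw [show 2*k+1+1 = 2*(k+1) by omega]
        exact hmmin (k+1) (by omega) (by omega)
      rw [if_neg hne]
      rw [show 2*k+1+1 = 2*(k+1) by omega]
      exact ih (k+1) (by omega) (by omega)

-- B in the periodic case
theorem perB (graph : List Int) (t p : Nat)
    (hlo : ∀ a, -(graph.length : Int) ≤ pvX graph a)
    (hhi : ∀ a, pvX graph a < (graph.length : Int))
    (h0 : pvX graph (t+p) = pvX graph t) (hp : 0 < p)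
    (htmin : ∀ a, a < t → ¬ ∃ c, 0 < c ∧ pvX graph (a+c) = pvX graph a)
    (hpmin : ∀ c, 0 < c → c < p → pvX graph (t+c) ≠ pvX graph t) :
    ∀ fuel s, s ≤ t + p → t + p + 1 ≤ s + fuel →
      floydB graph fuel (pvD graph s) (pvX graph s) (s : Int) =
        (some (pvX graph t), (p : Int)) := by
  intro fuel
  induction fuel with
  | zero => intro s h1 h2; omega
  | succ fuel ih =>
    intro s h1 h2
    rw [floydB, if_neg (by have := hhi s; omega)]
    by_cases hs : s = t + p
    · subst hs
      have hget : PySem.Dict.get? (pvD graph (t+p)) (pvX graph (t+p)) = some (t : Int) := by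
        unfold PySem.Dict.get? pvD
        rw [List.range_add, List.map_append, List.find?_append]
        have hnone : List.find? (fun q => q.1 == pvX graph (t+p))
            ((List.range t).map fun i => (pvX graph i, (i : Int))) = none := by
          rw [List.find?_eq_none]
          intro q hq
          simp only [List.mem_map, List.mem_range] at hq
          obtain ⟨i, hi, rfl⟩ := hq
          have : pvX graph i ≠ pvX graph (t+p) := by
            rw [h0]
            exact fun he => (pvX_inj graph t p h0 hp htmin hpmin i t hi (by omega)) he
          simpa using this
        rw [hnone, Option.none_or]
        obtain ⟨pp, rfl⟩ : ∃ pp, p = pp + 1 := ⟨p - 1, by omega⟩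
        rw [List.range_succ_eq_map, List.map_cons, List.map_cons]
        rw [List.find?_cons_of_pos (by simp [h0])]
        simp
      rw [hget]
      dsimp only
      have : ((t + p : Nat) : Int) - (t : Int) = (p : Int) := by push_cast; ring
      rw [h0, this]
    · have hs' : s < t + p := by omega
      rw [pvD_get_none graph s _
        (fun i hi => pvX_inj graph t p h0 hp htmin hpmin i s hi hs')]
      rw [pvG_some graph _ (hlo _) (hhi _)]
      dsimp only
      rw [pvD_insert graph s
        (fun i hi => pvX_inj graph t p h0 hp htmin hpmin i s hi hs')]
      have : ((s : Int) + 1) = ((s+1 : Nat) : Int) := by push_cast; ring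
      rw [this, show pvG graph (pvX graph s) = pvX graph (s+1) from rfl]
      exact ih (s+1) (by omega) (by omega)

-- a pairwise-distinct in-range orbit prefix has length at most 2*len
theorem cardBound (graph : List Int) (L : Nat)
    (hinj : ∀ a b, a < b → b < L → pvX graph a ≠ pvX graph b)
    (hlo : ∀ a, a < L → -(graph.length : Int) ≤ pvX graph a)
    (hhi : ∀ a, a < L → pvX graph a < (graph.length : Int)) :
    L ≤ 2 * graph.length := by
  have hmaps : ∀ a ∈ Finset.range L,
      pvX graph a ∈ Finset.Icc (-(graph.length : Int)) ((graph.length : Int) - 1) := by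
    intro a ha
    rw [Finset.mem_range] at ha
    rw [Finset.mem_Icc]
    exact ⟨hlo a ha, by have := hhi a ha; omega⟩
  have hinj' : Set.InjOn (fun a => pvX graph a) (Finset.range L) := by
    intro a ha b hb he
    simp only [Finset.coe_range, Set.mem_Iio] at ha hb
    rcases Nat.lt_trichotomy a b with h | h | h
    · exact absurd he (hinj a b h hb)
    · exact h
    · exact absurd he.symm (hinj b a h ha)
  have := Finset.card_le_card_of_injOn _ hmaps hinj'
  rw [Finset.card_range, Int.card_Icc] at this
  omega

-- escape-case assembly: both programs return (none, 0)
theorem escBoth (graph : List Int) (j : Nat)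
    (hlo : ∀ a, a < j → -(graph.length : Int) ≤ pvX graph a)
    (hhi : ∀ a, a < j → pvX graph a < (graph.length : Int))
    (hesc : (graph.length : Int) ≤ pvX graph j) (hj : j ≤ 2*graph.length + 1) :
    floyd_cycle_detection graph = floyd_cycle_detection_alt graph := by
  have hA := escA graph j hlo hhi hesc (2*graph.length+2) 0 (by omega) (by omega)
  have hB := escB graph j hlo hhi hesc (2*graph.length+2) 0 (by omega) (by omega)
  norm_num [pvX, pvD] at hA hB
  unfold floyd_cycle_detection floyd_cycle_detection_alt
  rw [show (PySem.Dict.empty : PySem.Dict Int Int) = ⟨[]⟩ from rfl]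
  rw [hA, hB]

theorem floyd_cycle_detection_spec : Claim_equal_floyd_cycle_detection := by
  classical
  intro graph _ hpre
  unfold Spec_floyd_cycle_detection
  unfold Pre_floyd_cycle_detection at hpre
  by_cases hbad : ∃ j, ¬ (-(graph.length : Int) ≤ pvX graph j ∧ pvX graph j < graph.length)
  · -- the walk leaves the index range; at the least such step it must escape upward
    set j := Nat.find hbad with hjdef
    have hj : ¬ (-(graph.length : Int) ≤ pvX graph j ∧ pvX graph j < graph.length) :=
      Nat.find_spec hbad
    have hrange : ∀ i, i < j →
        -(graph.length : Int) ≤ pvX graph i ∧ pvX graph i < graph.length := by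
      intro i hi
      have := Nat.find_min hbad hi
      tauto
    have hdist : ∀ a b, a < b → b < j → pvX graph a ≠ pvX graph b := by
      intro a b hab hbj he
      obtain ⟨c, hac, hcb, hc⟩ := pvX_stay graph a b hab he (j - a)
      rw [show a + (j - a) = j by omega] at hc
      exact hj (hc ▸ hrange c (by omega))
    have hjle : j ≤ 2*graph.length :=
      cardBound graph j hdist (fun a ha => (hrange a ha).1) (fun a ha => (hrange a ha).2)
    have hlow := hpre j (by omega) hrange
    have hesc : (graph.length : Int) ≤ pvX graph j := by
      by_contra h
      exact hj ⟨hlow, by omega⟩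
    exact escBoth graph j (fun a ha => (hrange a ha).1) (fun a ha => (hrange a ha).2)
      hesc (by omega)
  · -- the orbit stays in range forever: it is eventually periodic
    push Not at hbad
    have hlo : ∀ a, -(graph.length : Int) ≤ pvX graph a := fun a => (hbad a).1
    have hhi : ∀ a, pvX graph a < (graph.length : Int) := fun a => (hbad a).2
    -- pigeonhole: some orbit point repeats
    have hex : ∃ a, ∃ c, 0 < c ∧ pvX graph (a+c) = pvX graph a := by
      obtain ⟨a, _, b, _, hab, he⟩ :=
        Finset.exists_ne_map_eq_of_card_lt_of_maps_to
          (s := Finset.range (2*graph.length+1))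
          (t := Finset.Icc (-(graph.length : Int)) ((graph.length : Int) - 1))
          (by rw [Finset.card_range, Int.card_Icc]; omega)
          (fun a _ => by
            simp only [Finset.coe_Icc, Set.mem_Icc]
            exact ⟨hlo a, by have := hhi a; omega⟩)
      rcases Nat.lt_trichotomy a b with h | h | h
      · exact ⟨a, b - a, by omega, by rw [show a + (b-a) = b by omega]; exact he.symm⟩
      · omega
      · exact ⟨b, a - b, by omega, by rw [show b + (a-b) = a by omega]; exact he⟩
    set t := Nat.find hex with htdef
    obtain ⟨c0, hc0, hc0e⟩ := Nat.find_spec hex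
    have htmin : ∀ a, a < t → ¬ ∃ c, 0 < c ∧ pvX graph (a+c) = pvX graph a :=
      fun a ha => Nat.find_min hex ha
    have hpex : ∃ c, 0 < c ∧ pvX graph (t+c) = pvX graph t := ⟨c0, hc0, hc0e⟩
    set p := Nat.find hpex with hpdef
    obtain ⟨hp, h0⟩ : 0 < p ∧ pvX graph (t+p) = pvX graph t := Nat.find_spec hpex
    have hpmin : ∀ c, 0 < c → c < p → pvX graph (t+c) ≠ pvX graph t := by
      intro c h1 h2 he
      exact Nat.find_min hpex h2 ⟨h1, he⟩
    have htple : t + p ≤ 2*graph.length :=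
      cardBound graph (t+p) (pvX_inj graph t p h0 hp htmin hpmin)
        (fun a _ => hlo a) (fun a _ => hhi a)
    -- the first meeting step m of slow and fast
    have hk2 : p * ((t+p)/p) + (t+p) % p = t+p := Nat.div_add_mod (t+p) p
    have hk2m : (t+p) % p < p := Nat.mod_lt _ hp
    have hmex : ∃ k, 0 < k ∧ pvX graph k = pvX graph (2*k) := by
      refine ⟨p * ((t+p)/p), by omega, ?_⟩
      have h2 : 2 * (p * ((t+p)/p)) = p * ((t+p)/p) + ((t+p)/p) * p := by ring
      rw [h2, perAdd graph t p h0 _ (by omega) _]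
    set m := Nat.find hmex with hmdef
    obtain ⟨hm, hmeet⟩ : 0 < m ∧ pvX graph m = pvX graph (2*m) := Nat.find_spec hmex
    have hmmin : ∀ k, 0 < k → k < m → pvX graph k ≠ pvX graph (2*k) := by
      intro k h1 h2 he
      exact Nat.find_min hmex h2 ⟨h1, he⟩
    have hmle0 : m ≤ p * ((t+p)/p) := Nat.find_le ⟨by omega, by
      have h2 : 2 * (p * ((t+p)/p)) = p * ((t+p)/p) + ((t+p)/p) * p := by ring
      rw [h2, perAdd graph t p h0 _ (by omega) _]⟩
    have hmle : m ≤ t + p := by omega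
    have hmm : pvX graph (m + m) = pvX graph m := by
      rw [show m + m = 2*m by ring]; exact hmeet.symm
    have hdvd : p ∣ m :=
      pvX_gap graph t p h0 hp hpmin m m (pvX_tle graph t htmin m m hm hmm) hm hmm
    have hA := perA1 graph t p m hlo hhi h0 hp hm htmin hpmin hmeet hmmin hdvd
      (by omega) (by omega) (2*graph.length+2) 0 (by omega) (by omega)
    have hB := perB graph t p hlo hhi h0 hp htmin hpmin
      (2*graph.length+2) 0 (by omega) (by omega)
    norm_num [pvX, pvD] at hA hB
    unfold floyd_cycle_detection floyd_cycle_detection_alt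
    rw [show (PySem.Dict.empty : PySem.Dict Int Int) = ⟨[]⟩ from rfl]
    rw [hA, hB]
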